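-- pv_equiv track=rewrite | github.com/jutanke/mocap | mocap/math/fk.py | calculate_chain
-- ===== SOURCE A (Python) =====
-- def calculate_chain(parent, n_joints):
--     chain_per_joint = []
--     for jid in range(n_joints):
--         current = parent[jid]
--         chain = [current]
--         while current > -1:
--             current = parent[current]
--             chain.append(current)
--         chain.reverse()
--         chain.pop(0)
--         chain_per_joint.append(chain)
--     return chain_per_joint
-- ===== SOURCE B (Python) =====
-- def calculate_chain(parent, n_joints):
--     # memoized DP: each node's root-first ancestor chain is computed once and shared
--     memo = {}
--     out = []
--     for j in range(n_joints):
--         out.append(_chain_of(parent, memo, parent[j]))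
--     return out
--
--
-- def _chain_of(parent, memo, c):
--     # walk up only until the first already-memoized ancestor (or a root)
--     stack = []
--     while c > -1 and c not in memo:
--         stack.append(c)
--         c = parent[c]
--     chain = memo[c] if c > -1 else []
--     # unwind: extend the chain root-first and memoize every visited node
--     for node in reversed(stack):
--         chain = chain + [node]
--         memo[node] = chain
--     return chain
-- ===== Notes on version B (the rewrite author's own statement) =====
-- stated objective: alternative
-- what changed: Replaces A's per-joint while-loop that re-walks the whole path to the root for every joint (then reverse + pop) by a memoized walk: each node's root-first ancestor chain is computed once, stored in a dict, and reused, so shared path suffixes are not re-traversed.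
import Mathlib
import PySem

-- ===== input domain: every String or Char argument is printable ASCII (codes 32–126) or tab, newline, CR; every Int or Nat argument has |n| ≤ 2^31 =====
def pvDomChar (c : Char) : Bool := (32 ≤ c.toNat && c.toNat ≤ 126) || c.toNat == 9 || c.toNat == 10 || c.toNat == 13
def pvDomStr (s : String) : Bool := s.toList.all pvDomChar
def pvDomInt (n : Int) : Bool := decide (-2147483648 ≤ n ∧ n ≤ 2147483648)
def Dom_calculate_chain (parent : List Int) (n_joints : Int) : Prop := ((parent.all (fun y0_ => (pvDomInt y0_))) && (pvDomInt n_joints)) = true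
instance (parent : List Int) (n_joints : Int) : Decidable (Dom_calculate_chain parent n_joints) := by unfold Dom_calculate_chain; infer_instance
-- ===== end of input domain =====

-- B replaces A's per-joint while-loop re-walk to the root (then reverse + pop) by a
-- memoized walk: each node's root-first chain is built once, stored in a dict, and reused.

-- ===== PORT A =====
-- the 'while current > -1' loop; fuel parent.length+1 suffices on Pre_ (A terminates there)
def chainLoop (parent : List Int) : Nat → Int → List Int → List Int
  | 0, _, chain => chain
  | fuel+1, current, chain =>
    if current > -1 then
      let next := PySem.List.pyGetD parent current 0
      chainLoop parent fuel next (chain ++ [next])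
    else chain

def calculate_chain (parent : List Int) (n_joints : Int) : List (List Int) :=
  (PySem.List.pyRange 0 n_joints 1).foldl (fun chain_per_joint jid =>
    let current := PySem.List.pyGetD parent jid 0
    let chain := chainLoop parent (parent.length + 1) current [current]
    -- chain.reverse(); chain.pop(0): chain starts nonempty, so pop(0) = drop 1
    chain_per_joint ++ [chain.reverse.drop 1]) []

-- ===== PORT B =====
-- the 'while c > -1 and c not in memo' loop of _chain_of; same fuel bound
def pvCollect (parent : List Int) (memo : PySem.Dict Int (List Int)) :
    Nat → Int → List Int → Int × List Int
  | 0, c, stack => (c, stack)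
  | fuel+1, c, stack =>
    if c > -1 ∧ memo.get? c = none then
      pvCollect parent memo fuel (PySem.List.pyGetD parent c 0) (stack ++ [c])
    else (c, stack)

-- _chain_of: walk, then unwind the stack extending and memoizing
def pvChainOf (parent : List Int) (memo : PySem.Dict Int (List Int)) (c : Int) :
    List Int × PySem.Dict Int (List Int) :=
  let r := pvCollect parent memo (parent.length + 1) c []
  let chain0 := if r.1 > -1 then (memo.get? r.1).getD [] else []
  r.2.reverse.foldl (fun p node => (p.1 ++ [node], p.2.insert node (p.1 ++ [node])))
    (chain0, memo)

def calculate_chain_alt (parent : List Int) (n_joints : Int) : List (List Int) :=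
  ((PySem.List.pyRange 0 n_joints 1).foldl
      (fun (st : PySem.Dict Int (List Int) × List (List Int)) j =>
        let r := pvChainOf parent st.1 (PySem.List.pyGetD parent j 0)
        (r.2, st.2 ++ [r.1]))
      (PySem.Dict.empty, [])).2

-- ===== PRECONDITION & SPEC =====
-- the guarded parent-step map: in-range nodes step to their parent entry, everything else is stuck
def pvStepF (parent : List Int) (c : Int) : Int :=
  if 0 ≤ c ∧ c < (parent.length : Int) then PySem.List.pyGetD parent c 0 else c

-- Pre_ is exactly the inputs on which Python A returns normally: n_joints within the array
-- (or ≤ 0) and, from each joint's parent, the parent walk reaches a root (a value ≤ -1)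
-- within len(parent) steps without leaving the array; otherwise A raises IndexError or
-- loops forever.
def Pre_calculate_chain (parent : List Int) (n_joints : Int) : Prop :=
  (n_joints ≤ (parent.length : Int) ∨ n_joints ≤ 0) ∧
  ∀ j ∈ PySem.List.pyRange 0 n_joints 1,
    (pvStepF parent)^[parent.length + 1] (PySem.List.pyGetD parent j 0) ≤ -1

instance (parent : List Int) (n_joints : Int) : Decidable (Pre_calculate_chain parent n_joints) := by
  unfold Pre_calculate_chain; infer_instance

def pvWitness_calculate_chain : List Int × Int := ([-1, 3, 1, 0, -1, 4], 6)

def Spec_calculate_chain (parent : List Int) (n_joints : Int) (out : List (List Int)) : Prop := out = calculate_chain_alt parent n_joints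
instance (parent : List Int) (n_joints : Int) (out : List (List Int)) : Decidable (Spec_calculate_chain parent n_joints out) := by unfold Spec_calculate_chain; infer_instance

-- ===== CLAIM (what is proved, stated in full; the proofs are below) =====
def Claim_equal_calculate_chain : Prop := ∀ (parent : List Int) (n_joints : Int), Dom_calculate_chain parent n_joints → Pre_calculate_chain parent n_joints → Spec_calculate_chain parent n_joints (calculate_chain parent n_joints)

-- ===== LEMMAS AND PROOFS =====

-- the sequence of values A's while loop appends
def pvWalk (parent : List Int) : Nat → Int → List Int
  | 0, _ => []
  | fuel+1, c =>
    if c > -1 then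
      PySem.List.pyGetD parent c 0 :: pvWalk parent fuel (PySem.List.pyGetD parent c 0)
    else []

-- the ancestor chain of value c, root first (= A's chain after reverse + pop(0))
def pvAnc (parent : List Int) : Nat → Int → List Int
  | 0, _ => []
  | fuel+1, c =>
    if c > -1 then
      pvAnc parent fuel (PySem.List.pyGetD parent c 0) ++ [c]
    else []

theorem chainLoop_eq_walk (parent : List Int) (fuel : Nat) :
    ∀ (c : Int) (acc : List Int),
      chainLoop parent fuel c acc = acc ++ pvWalk parent fuel c := by
  induction fuel with
  | zero => intro c acc; simp [chainLoop, pvWalk]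
  | succ n ih =>
    intro c acc
    by_cases hc : c > -1
    · simp [chainLoop, pvWalk, hc, ih]
    · simp [chainLoop, pvWalk, hc]

theorem drop_one_append_singleton {α : Type} (l : List α) (h : l ≠ []) (a : α) :
    (l ++ [a]).drop 1 = l.drop 1 ++ [a] := by
  cases l with
  | nil => exact absurd rfl h
  | cons x xs => simp

theorem reverse_walk_eq_anc (parent : List Int) (fuel : Nat) :
    ∀ (c : Int), (c :: pvWalk parent fuel c).reverse.drop 1 = pvAnc parent fuel c := by
  induction fuel with
  | zero => intro c; simp [pvWalk, pvAnc]
  | succ n ih =>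
    intro c
    by_cases hc : c > -1
    · have hne : (PySem.List.pyGetD parent c 0 :: pvWalk parent n (PySem.List.pyGetD parent c 0)).reverse ≠ [] := by
        simp
      rw [pvWalk, pvAnc, if_pos hc, if_pos hc, List.reverse_cons,
        drop_one_append_singleton _ hne c, ih]
    · simp [pvWalk, pvAnc, hc]

theorem anc_neg (parent : List Int) (fuel : Nat) (c : Int) (hc : ¬ c > -1) :
    pvAnc parent fuel c = [] := by
  cases fuel <;> simp [pvAnc, hc]

-- stepping a positive node that terminates: it is in range and its parent entry terminates in one step fewer
theorem step_pos (parent : List Int) (k : Nat) (c : Int) (hc : c > -1)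
    (ht : (pvStepF parent)^[k + 1] c ≤ -1) :
    c < (parent.length : Int) ∧
      (pvStepF parent)^[k] (PySem.List.pyGetD parent c 0) ≤ -1 := by
  by_cases hr : c < (parent.length : Int)
  · have hs : pvStepF parent c = PySem.List.pyGetD parent c 0 := by
      unfold pvStepF; rw [if_pos ⟨by omega, hr⟩]
    rw [Function.iterate_succ_apply, hs] at ht
    exact ⟨hr, ht⟩
  · exfalso
    have hs : pvStepF parent c = c := by
      unfold pvStepF; rw [if_neg (by omega)]
    rw [Function.iterate_succ_apply, hs, Function.iterate_fixed hs] at ht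
    omega

-- fuel stability of pvAnc on terminating starts
theorem anc_stable (parent : List Int) :
    ∀ (k f : Nat), k ≤ f → ∀ (c : Int), (pvStepF parent)^[k] c ≤ -1 →
      pvAnc parent (f + 1) c = pvAnc parent f c := by
  intro k
  induction k with
  | zero =>
    intro f _ c ht
    simp only [Function.iterate_zero, id] at ht
    rw [anc_neg parent _ c (by omega), anc_neg parent _ c (by omega)]
  | succ k ih =>
    intro f hkf c ht
    by_cases hc : c > -1
    · obtain ⟨_, ht'⟩ := step_pos parent k c hc ht
      obtain ⟨f', rfl⟩ : ∃ f', f = f' + 1 := ⟨f - 1, by omega⟩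
      have e1 : pvAnc parent (f' + 1 + 1) c
          = pvAnc parent (f' + 1) (PySem.List.pyGetD parent c 0) ++ [c] := by
        rw [pvAnc, if_pos hc]
      have e2 : pvAnc parent (f' + 1) c
          = pvAnc parent f' (PySem.List.pyGetD parent c 0) ++ [c] := by
        rw [pvAnc, if_pos hc]
      rw [e1, e2, ih f' (by omega) _ ht']
    · rw [anc_neg parent _ c hc, anc_neg parent _ c hc]

-- memo invariant: everything memoized is a correct root-first ancestor chain
def pvInv (parent : List Int) (memo : PySem.Dict Int (List Int)) : Prop :=
  ∀ (k : Int) (v : List Int), memo.get? k = some v → v = pvAnc parent (parent.length + 1) k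

-- the initial stack passes through pvCollect as a prefix
theorem collect_stack (parent : List Int) (memo : PySem.Dict Int (List Int)) :
    ∀ (fuel : Nat) (c : Int) (s : List Int),
      pvCollect parent memo fuel c s
        = ((pvCollect parent memo fuel c []).1, s ++ (pvCollect parent memo fuel c []).2) := by
  intro fuel
  induction fuel with
  | zero => intro c s; simp [pvCollect]
  | succ f ih =>
    intro c s
    by_cases h : c > -1 ∧ memo.get? c = none
    · rw [pvCollect, if_pos h, pvCollect, if_pos h, ih _ (s ++ [c]), ih _ ([] ++ [c])]
      simp
    · rw [pvCollect, if_neg h, pvCollect, if_neg h]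
      simp

-- a fuel-generalised _chain_of, for the induction
def pvGChainOf (parent : List Int) (memo : PySem.Dict Int (List Int)) (fuel : Nat) (c : Int) :
    List Int × PySem.Dict Int (List Int) :=
  let r := pvCollect parent memo fuel c []
  let chain0 := if r.1 > -1 then (memo.get? r.1).getD [] else []
  r.2.reverse.foldl (fun p node => (p.1 ++ [node], p.2.insert node (p.1 ++ [node])))
    (chain0, memo)

-- when the walk stops immediately (root or memoized), _chain_of just reads the answer
theorem gchain_stop (parent : List Int) (memo : PySem.Dict Int (List Int)) (f : Nat) (c : Int)
    (hc : ¬ (c > -1 ∧ memo.get? c = none)) :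
    pvGChainOf parent memo f c = ((if c > -1 then (memo.get? c).getD [] else []), memo) := by
  have hcol : pvCollect parent memo f c [] = (c, []) := by
    cases f with
    | zero => rfl
    | succ f' => rw [pvCollect, if_neg hc]
  unfold pvGChainOf
  rw [hcol]
  rfl

theorem gchain_sound (parent : List Int) :
    ∀ (d : Nat), ∀ (f : Nat), d ≤ f → f ≤ parent.length + 1 →
      ∀ (c : Int) (memo : PySem.Dict Int (List Int)), pvInv parent memo →
        (pvStepF parent)^[d] c ≤ -1 →
        (pvGChainOf parent memo f c).1 = pvAnc parent (parent.length + 1) c ∧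
          pvInv parent (pvGChainOf parent memo f c).2 := by
  intro d
  induction d with
  | zero =>
    intro f _ _ c memo hinv ht
    simp only [Function.iterate_zero, id] at ht
    have hc : ¬ (c > -1 ∧ memo.get? c = none) := fun h => absurd h.1 (by omega)
    rw [gchain_stop parent memo f c hc]
    refine ⟨?_, hinv⟩
    rw [anc_neg parent _ c (by omega)]
    simp only [if_neg (show ¬ c > -1 by omega)]
  | succ k ih =>
    intro f hdf hf c memo hinv ht
    by_cases hc : c > -1 ∧ memo.get? c = none
    · obtain ⟨f', rfl⟩ : ∃ f', f = f' + 1 := ⟨f - 1, by omega⟩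
      obtain ⟨hcr, ht'⟩ := step_pos parent k c hc.1 ht
      have hcol : pvCollect parent memo (f' + 1) c []
          = ((pvCollect parent memo f' (PySem.List.pyGetD parent c 0) []).1,
             c :: (pvCollect parent memo f' (PySem.List.pyGetD parent c 0) []).2) := by
        rw [pvCollect, if_pos hc, collect_stack]
        simp
      have ihr := ih f' (by omega) (by omega) (PySem.List.pyGetD parent c 0) memo hinv ht'
      unfold pvGChainOf at ihr ⊢
      rw [hcol]
      simp only [List.reverse_cons, List.foldl_append, List.foldl_cons, List.foldl_nil]
      set q := ((pvCollect parent memo f' (PySem.List.pyGetD parent c 0) []).2.reverse.foldl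
        (fun p node => (p.1 ++ [node], p.2.insert node (p.1 ++ [node])))
        ((if (pvCollect parent memo f' (PySem.List.pyGetD parent c 0) []).1 > -1 then
            (memo.get? (pvCollect parent memo f' (PySem.List.pyGetD parent c 0) []).1).getD []
          else []), memo)) with hq
      have hanc : pvAnc parent (parent.length + 1) c
          = pvAnc parent (parent.length + 1) (PySem.List.pyGetD parent c 0) ++ [c] := by
        conv_lhs => rw [pvAnc, if_pos hc.1]
        rw [anc_stable parent k parent.length (by omega) _ ht']
      constructor
      · rw [hanc, ihr.1]
      · intro k' v' hget
        rw [PySem.Dict.get?_insert] at hget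
        by_cases hk : k' = c
        · rw [if_pos hk] at hget
          cases hget
          rw [ihr.1, hk, hanc]
        · rw [if_neg hk] at hget
          exact ihr.2 k' v' hget
    · rw [gchain_stop parent memo f c hc]
      refine ⟨?_, hinv⟩
      by_cases hcp : c > -1
      · obtain ⟨v, hv⟩ : ∃ v, memo.get? c = some v := by
          cases hmv : memo.get? c with
          | none => exact absurd ⟨hcp, hmv⟩ hc
          | some v => exact ⟨v, rfl⟩
        rw [if_pos hcp, hv, (hinv c v hv)]
        rfl
      · rw [if_neg hcp, anc_neg parent _ c hcp]

theorem calcA_eq_map (parent : List Int) (n_joints : Int) :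
    calculate_chain parent n_joints =
      (PySem.List.pyRange 0 n_joints 1).map
        (fun j => pvAnc parent (parent.length + 1) (PySem.List.pyGetD parent j 0)) := by
  unfold calculate_chain
  rw [PySem.List.foldl_append_singleton_eq_map]
  · apply List.map_congr_left
    intro j _
    rw [chainLoop_eq_walk, List.singleton_append, reverse_walk_eq_anc]

theorem calcB_eq_map (parent : List Int) (n_joints : Int)
    (_hlen : n_joints ≤ (parent.length : Int) ∨ n_joints ≤ 0)
    (hterm : ∀ j ∈ PySem.List.pyRange 0 n_joints 1,
      (pvStepF parent)^[parent.length + 1] (PySem.List.pyGetD parent j 0) ≤ -1) :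
    calculate_chain_alt parent n_joints =
      (PySem.List.pyRange 0 n_joints 1).map
        (fun j => pvAnc parent (parent.length + 1) (PySem.List.pyGetD parent j 0)) := by
  unfold calculate_chain_alt
  by_cases hn : n_joints ≤ 0
  · rw [PySem.List.pyRange_one_eq_nil hn]; rfl
  · have key : ∀ M : Nat, (M : Int) ≤ n_joints →
        ∃ memo,
          (PySem.List.pyRange 0 (M : Int) 1).foldl
            (fun (st : PySem.Dict Int (List Int) × List (List Int)) j =>
              let r := pvChainOf parent st.1 (PySem.List.pyGetD parent j 0)
              (r.2, st.2 ++ [r.1]))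
            (PySem.Dict.empty, [])
          = (memo, (PySem.List.pyRange 0 (M : Int) 1).map
              (fun j => pvAnc parent (parent.length + 1) (PySem.List.pyGetD parent j 0))) ∧
          pvInv parent memo := by
      intro M
      induction M with
      | zero =>
        intro _
        refine ⟨PySem.Dict.empty, ?_, ?_⟩
        · rw [PySem.List.pyRange_one_eq_nil (by omega)]; rfl
        · intro k v hget
          rw [PySem.Dict.get?_empty] at hget
          cases hget
      | succ M ihM =>
        intro hM
        obtain ⟨memo, heq, hinv⟩ := ihM (by omega)
        have hcast : ((M + 1 : Nat) : Int) = (M : Int) + 1 := by push_cast; ring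
        rw [hcast, PySem.List.pyRange_one_succ_right (by omega), List.foldl_append,
          List.map_append, heq]
        simp only [List.foldl_cons, List.foldl_nil, List.map_cons, List.map_nil]
        have hterm' : (pvStepF parent)^[parent.length + 1]
            (PySem.List.pyGetD parent (M : Int) 0) ≤ -1 := by
          apply hterm
          rw [PySem.List.mem_pyRange_one]
          omega
        have hg := gchain_sound parent (parent.length + 1) (parent.length + 1) le_rfl le_rfl
          (PySem.List.pyGetD parent (M : Int) 0) memo hinv hterm'
        have hpv : pvChainOf parent memo (PySem.List.pyGetD parent (M : Int) 0)
            = pvGChainOf parent memo (parent.length + 1)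
                (PySem.List.pyGetD parent (M : Int) 0) := rfl
        refine ⟨(pvChainOf parent memo (PySem.List.pyGetD parent (M : Int) 0)).2, ?_, ?_⟩
        · rw [hpv, hg.1]
        · rw [hpv]; exact hg.2
    have hcast : n_joints = ((n_joints.toNat : Nat) : Int) := (Int.toNat_of_nonneg (by omega)).symm
    rw [hcast]
    obtain ⟨memo, heq, _⟩ := key n_joints.toNat (by omega)
    rw [heq]

-- ===== VERDICT (by name: the statement is the Claim_ definition above) =====
theorem calculate_chain_spec : Claim_equal_calculate_chain := by
  intro parent n_joints _ hpre
  unfold Spec_calculate_chain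
  rw [calcA_eq_map, calcB_eq_map parent n_joints hpre.1 hpre.2]
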